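-- pv_equiv track=rewrite | github.com/NaayoungKwon/AlgorithmStudy | 백준/Gold/1727. 커플 만들기/커플 만들기.py | solution
-- ===== SOURCE A (Python) =====
-- def solution(n, m, men, women):
--     if n < m:
--         men, women = women, men
--         n, m = m, n
--     dp = [[0] * n for _ in range(m)]
--     men.sort()
--     women.sort()
--
--     result = 0
--     p = 0
--
--     dp[0][0] = abs(men[0] - women[0])
--     for j in range(1, n-m+1):
--         dp[0][j] = min(abs(men[j] - women[0]), dp[0][j-1])
--
--     for i in range(1,m): # 여자
--         for j in range(i, n-m+i+1): # 남자
--             if i == j: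
--                 dp[i][j] = dp[i-1][j-1] + abs(men[j] - women[i])
--             else:
--                 dp[i][j] = min(dp[i][j-1], dp[i-1][j-1] + abs(men[j] - women[i]))
--
--     return dp[m-1][n-1]
-- ===== SOURCE B (Python) =====
-- def solution(n, m, men, women):
--     # top-down: memoized recursion from the goal state instead of filling a table
--     # (sorts men/women in place, like the original)
--     if n < m:
--         n, m, men, women = m, n, women, men
--     men.sort()
--     women.sort()
--     memo = {}
--
--     def rec(i, j):
--         # min cost of matching women[0..i] to distinct men among men[0..j]
--         if (i, j) in memo:
--             return memo[(i, j)]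
--         if i == 0:
--             if j == 0:
--                 v = abs(men[0] - women[0])
--             else:
--                 v = min(abs(men[j] - women[0]), rec(0, j - 1))
--         elif j == i:
--             v = rec(i - 1, j - 1) + abs(men[j] - women[i])
--         else:
--             v = min(rec(i, j - 1), rec(i - 1, j - 1) + abs(men[j] - women[i]))
--         memo[(i, j)] = v
--         return v
--
--     return rec(m - 1, n - 1)
-- ===== Notes on version B (the rewrite author's own statement) =====
-- stated objective: alternative
-- what changed: Replaces A's bottom-up fill of an m×n table (explicit base-row loop plus a row-major banded double loop) by a top-down memoized recursion rec(i, j) started at the goal state (m-1, n-1): values are computed lazily on demand and stored in a dict keyed by (i, j), so only the reachable states exist and no table is allocated.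
import Mathlib
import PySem

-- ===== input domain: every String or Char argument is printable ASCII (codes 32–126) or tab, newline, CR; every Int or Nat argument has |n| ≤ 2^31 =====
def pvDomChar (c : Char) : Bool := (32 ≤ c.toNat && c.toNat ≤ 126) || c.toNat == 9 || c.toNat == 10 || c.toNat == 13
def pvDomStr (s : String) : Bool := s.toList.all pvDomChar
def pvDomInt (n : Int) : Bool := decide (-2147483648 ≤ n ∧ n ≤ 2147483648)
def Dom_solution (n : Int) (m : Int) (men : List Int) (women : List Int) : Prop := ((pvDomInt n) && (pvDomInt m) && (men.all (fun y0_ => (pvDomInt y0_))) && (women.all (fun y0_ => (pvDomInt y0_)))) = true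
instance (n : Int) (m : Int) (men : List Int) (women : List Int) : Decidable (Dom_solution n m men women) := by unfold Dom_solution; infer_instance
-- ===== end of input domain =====

-- B replaces A's bottom-up fill of an m×n table by a top-down memoized recursion started at the
-- goal state (m-1, n-1), caching values in a dict keyed by (i, j); only reachable states are
-- computed and no table is allocated. Both A and B sort `men` and `women` in place (same
-- observable mutation); the equivalence proved is about the return value.

-- ===== PORT A =====
-- xs[i] for an int index (Pre_ keeps every index in range)
def pvGet (xs : List Int) (i : Int) : Int := (PySem.List.pyGet? xs i).getD 0
-- dp[i][j] read / write on the list-of-lists table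
def pvCell (dp : List (List Int)) (i j : Nat) : Int := (dp.getD i []).getD j 0
def pvSetCell (dp : List (List Int)) (i j : Nat) (v : Int) : List (List Int) :=
  dp.set i ((dp.getD i []).set j v)

-- body of A's first loop: dp[0][j] = min(abs(men[j]-women[0]), dp[0][j-1])
def pvStepRow0 (M W : List Int) (dp : List (List Int)) (j : Int) : List (List Int) :=
  pvSetCell dp 0 j.toNat (min |pvGet M j - pvGet W 0| (pvCell dp 0 (j - 1).toNat))

-- body of A's inner loop for row i
def pvStepMain (M W : List Int) (i : Int) (dp : List (List Int)) (j : Int) : List (List Int) :=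
  if i = j then
    pvSetCell dp i.toNat j.toNat
      (pvCell dp (i - 1).toNat (j - 1).toNat + |pvGet M j - pvGet W i|)
  else
    pvSetCell dp i.toNat j.toNat
      (min (pvCell dp i.toNat (j - 1).toNat)
           (pvCell dp (i - 1).toNat (j - 1).toNat + |pvGet M j - pvGet W i|))

-- A's body after the initial swap has ensured n ≥ m (Python reassigns the four locals)
def solutionCore (n m : Int) (men women : List Int) : Int :=
  let menS := PySem.List.sorted men (fun x => x)
  let womenS := PySem.List.sorted women (fun x => x)
  let dp0 : List (List Int) := List.replicate m.toNat (List.replicate n.toNat 0)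
  let dp1 := pvSetCell dp0 0 0 |pvGet menS 0 - pvGet womenS 0|
  let dp2 := (PySem.List.pyRange 1 (n - m + 1)).foldl (pvStepRow0 menS womenS) dp1
  let dp3 := (PySem.List.pyRange 1 m).foldl
      (fun dp i => (PySem.List.pyRange i (n - m + i + 1)).foldl (pvStepMain menS womenS i) dp) dp2
  pvCell dp3 (m - 1).toNat (n - 1).toNat

def solution (n : Int) (m : Int) (men : List Int) (women : List Int) : Int :=
  if n < m then solutionCore m n women men else solutionCore n m men women

-- ===== PORT B =====
-- rec(i, j) with the memo dict threaded through (Python mutates one dict; the port passes it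
-- along and returns it updated). The (i'+1, 0) branch is unreachable (rec is only invoked with
-- i ≤ j) and exists only to make the match total.
def recB (M W : List Int) : Nat → Nat → PySem.Dict (Nat × Nat) Int → Int × PySem.Dict (Nat × Nat) Int
  | i, j, memo =>
    match PySem.Dict.get? memo (i, j) with
    | some v => (v, memo)
    | none =>
      match i, j with
      | 0, 0 =>
          let v := |pvGet M 0 - pvGet W 0|
          (v, PySem.Dict.insert memo (0, 0) v)
      | 0, j' + 1 =>
          let r := recB M W 0 j' memo
          let v := min |pvGet M ((j' + 1 : Nat) : Int) - pvGet W 0| r.1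
          (v, PySem.Dict.insert r.2 (0, j' + 1) v)
      | _ + 1, 0 => (0, memo)
      | i' + 1, j' + 1 =>
          if j' + 1 = i' + 1 then
            let r := recB M W i' j' memo
            let v := r.1 + |pvGet M ((j' + 1 : Nat) : Int) - pvGet W ((i' + 1 : Nat) : Int)|
            (v, PySem.Dict.insert r.2 (i' + 1, j' + 1) v)
          else
            let r1 := recB M W (i' + 1) j' memo
            let r2 := recB M W i' j' r1.2
            let v := min r1.1 (r2.1 + |pvGet M ((j' + 1 : Nat) : Int) - pvGet W ((i' + 1 : Nat) : Int)|)
            (v, PySem.Dict.insert r2.2 (i' + 1, j' + 1) v)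
  termination_by _ j _ => j

-- B's body after the initial swap has ensured n ≥ m
def solutionAltCore (n m : Int) (men women : List Int) : Int :=
  let menS := PySem.List.sorted men (fun x => x)
  let womenS := PySem.List.sorted women (fun x => x)
  (recB menS womenS (m - 1).toNat (n - 1).toNat PySem.Dict.empty).1

def solution_alt (n : Int) (m : Int) (men : List Int) (women : List Int) : Int :=
  if n < m then solutionAltCore m n women men else solutionAltCore n m men women

-- ===== PRECONDITION & SPEC =====
-- Pre_ = exactly the inputs where Python A returns: positive counts no larger than the list
-- lengths (otherwise A hits an IndexError on dp, men or women).
def Pre_solution (n : Int) (m : Int) (men : List Int) (women : List Int) : Prop :=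
  1 ≤ n ∧ 1 ≤ m ∧ n ≤ (men.length : Int) ∧ m ≤ (women.length : Int)
instance (n : Int) (m : Int) (men : List Int) (women : List Int) : Decidable (Pre_solution n m men women) := by unfold Pre_solution; infer_instance

def pvWitness_solution : Int × Int × List Int × List Int := (2, 1, [1, 5], [3])

def Spec_solution (n : Int) (m : Int) (men : List Int) (women : List Int) (out : Int) : Prop := out = solution_alt n m men women
instance (n : Int) (m : Int) (men : List Int) (women : List Int) (out : Int) : Decidable (Spec_solution n m men women out) := by unfold Spec_solution; infer_instance

-- ===== CLAIM (what is proved, stated in full; the proofs are below) =====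
def Claim_equal_solution : Prop := ∀ (n : Int) (m : Int) (men : List Int) (women : List Int), Dom_solution n m men women → Pre_solution n m men women → Spec_solution n m men women (solution n m men women)

-- ===== LEMMAS AND PROOFS =====

-- min of two optional costs (none = infeasible)
def optMin : Option Int → Option Int → Option Int
  | none, y => y
  | some a, none => some a
  | some a, some b => some (min a b)

-- G M W k j = minimal cost of matching the first k women to k distinct of the first j men,
-- both lists taken in order; none iff j < k. This is the common value both programs compute.
def G (M W : List Int) : Nat → Nat → Option Int
  | 0, _ => some 0
  | _ + 1, 0 => none
  | k + 1, j + 1 =>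
      optMin (G M W (k + 1) j)
        ((G M W k j).map (fun v => v + |M.getD j 0 - W.getD k 0|))
termination_by _ j => j

def gval (M W : List Int) (k j : Nat) : Int := (G M W k j).getD 0

lemma G_step (M W : List Int) (k j : Nat) :
    G M W (k + 1) (j + 1) =
      optMin (G M W (k + 1) j) ((G M W k j).map (fun v => v + |M.getD j 0 - W.getD k 0|)) := by
  rw [G]

lemma G_zero (M W : List Int) (j : Nat) : G M W 0 j = some 0 := by
  cases j <;> simp [G]

lemma G_none_of_lt (M W : List Int) : ∀ j k : Nat, j < k → G M W k j = none := by
  intro j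
  induction j with
  | zero => intro k hk; obtain ⟨k', rfl⟩ := Nat.exists_eq_succ_of_ne_zero (by omega : k ≠ 0); simp [G]
  | succ j ih =>
    intro k hk
    obtain ⟨k', rfl⟩ := Nat.exists_eq_succ_of_ne_zero (by omega : k ≠ 0)
    rw [G_step]
    rw [ih (k' + 1) (by omega), ih k' (by omega)]
    rfl

lemma G_isSome (M W : List Int) : ∀ j k : Nat, k ≤ j → (G M W k j).isSome := by
  intro j
  induction j with
  | zero => intro k hk; interval_cases k; simp [G]
  | succ j ih =>
    intro k hk
    cases k with
    | zero => simp [G_zero]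
    | succ k' =>
      rw [G_step]
      have h2 := ih k' (by omega)
      obtain ⟨b, hb⟩ := Option.isSome_iff_exists.mp h2
      rw [hb]
      cases G M W (k' + 1) j <;> simp [optMin]

lemma G_eq_some (M W : List Int) (k j : Nat) (h : k ≤ j) : G M W k j = some (gval M W k j) := by
  obtain ⟨a, ha⟩ := Option.isSome_iff_exists.mp (G_isSome M W j k h)
  simp [gval, ha]

lemma gval_one_one (M W : List Int) : gval M W 1 1 = |M.getD 0 0 - W.getD 0 0| := by
  rw [gval, G_step, G_zero, G_none_of_lt M W 0 1 (by omega)]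
  simp [optMin]

lemma gval_row0 (M W : List Int) (j : Nat) (hj : 1 ≤ j) :
    gval M W 1 (j + 1) = min |M.getD j 0 - W.getD 0 0| (gval M W 1 j) := by
  have h1 := G_eq_some M W 1 j hj
  rw [gval, G_step, h1, G_zero]
  simp [optMin, min_comm]

lemma gval_diag (M W : List Int) (k : Nat) :
    gval M W (k + 1) (k + 1) = gval M W k k + |M.getD k 0 - W.getD k 0| := by
  have h1 := G_eq_some M W k k le_rfl
  rw [gval, G_step, G_none_of_lt M W k (k + 1) (by omega), h1]
  simp [optMin]

lemma gval_inner (M W : List Int) (k j : Nat) (h : k + 1 ≤ j) :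
    gval M W (k + 1) (j + 1) =
      min (gval M W (k + 1) j) (gval M W k j + |M.getD j 0 - W.getD k 0|) := by
  have h1 := G_eq_some M W (k + 1) j h
  have h2 := G_eq_some M W k j (by omega)
  rw [gval, G_step, h1, h2]
  simp [optMin]


-- ---- access bookkeeping ----

lemma pvGet_eq (xs : List Int) (i : Int) (h0 : 0 ≤ i) :
    pvGet xs i = xs.getD i.toNat 0 := by
  unfold pvGet
  rw [show i = (i.toNat : Int) from (Int.toNat_of_nonneg h0).symm, PySem.List.pyGet?_natCast,
    ← List.getD_eq_getElem?_getD, Int.toNat_natCast]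

lemma length_pvSetCell (dp : List (List Int)) (i j : Nat) (v : Int) :
    (pvSetCell dp i j v).length = dp.length := by simp [pvSetCell]

lemma row_pvSetCell_ne (dp : List (List Int)) (i j : Nat) (v : Int) (r : Nat) (h : r ≠ i) :
    (pvSetCell dp i j v).getD r [] = dp.getD r [] := by
  unfold pvSetCell
  rw [List.getD_eq_getElem?_getD, List.getElem?_set_ne (fun hh => h hh.symm),
    ← List.getD_eq_getElem?_getD]

lemma row_pvSetCell_self (dp : List (List Int)) (i j : Nat) (v : Int) (h : i < dp.length) :
    (pvSetCell dp i j v).getD i [] = (dp.getD i []).set j v := by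
  unfold pvSetCell
  rw [List.getD_eq_getElem?_getD, List.getElem?_set_self h]
  rfl

lemma pvCell_pvSetCell_ne_row (dp : List (List Int)) (i j : Nat) (v : Int) (r c : Nat) (h : r ≠ i) :
    pvCell (pvSetCell dp i j v) r c = pvCell dp r c := by
  unfold pvCell
  rw [row_pvSetCell_ne dp i j v r h]

lemma pvCell_pvSetCell_ne_col (dp : List (List Int)) (i j : Nat) (v : Int) (c : Nat) (h : c ≠ j) :
    pvCell (pvSetCell dp i j v) i c = pvCell dp i c := by
  unfold pvCell
  by_cases hi : i < dp.length
  · rw [row_pvSetCell_self dp i j v hi, List.getD_eq_getElem?_getD,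
      List.getElem?_set_ne (fun hh => h hh.symm), ← List.getD_eq_getElem?_getD]
  · unfold pvSetCell
    rw [List.set_eq_of_length_le (by omega)]

lemma pvCell_pvSetCell_self (dp : List (List Int)) (i j : Nat) (v : Int)
    (hi : i < dp.length) (hj : j < (dp.getD i []).length) :
    pvCell (pvSetCell dp i j v) i j = v := by
  unfold pvCell
  rw [row_pvSetCell_self dp i j v hi, List.getD_eq_getElem?_getD, List.getElem?_set_self hj]
  rfl

lemma rowlen_pvSetCell (dp : List (List Int)) (i j : Nat) (v : Int) (r : Nat) :
    ((pvSetCell dp i j v).getD r []).length = (dp.getD r []).length := by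
  by_cases h : r = i
  · subst h
    by_cases hi : r < dp.length
    · rw [row_pvSetCell_self dp r j v hi, List.length_set]
    · unfold pvSetCell
      rw [List.set_eq_of_length_le (by omega)]
  · rw [row_pvSetCell_ne dp i j v r h]

-- ---- A-side ----

-- table invariants
def RowShape (N K : Nat) (dp : List (List Int)) : Prop :=
  dp.length = K ∧ ∀ r : Nat, ((dp.getD r []).length = if r < K then N else 0)

lemma RowShape_set (N K : Nat) (dp : List (List Int)) (i j : Nat) (v : Int)
    (h : RowShape N K dp) : RowShape N K (pvSetCell dp i j v) := by
  obtain ⟨h1, h2⟩ := h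
  exact ⟨by simp [length_pvSetCell, h1], fun r => by rw [rowlen_pvSetCell]; exact h2 r⟩

-- after A's first loop has processed j = 1 .. t : row 0 holds gval 1 (j+1) for j ≤ t
lemma rowA_fold (M W : List Int) (N K : Nat) (hK : 1 ≤ K) (hKN : K ≤ N)
    (_hM : N ≤ M.length) (_hW : K ≤ W.length) (dp1 : List (List Int))
    (hshape : RowShape N K dp1) (hbase : pvCell dp1 0 0 = gval M W 1 1) :
    ∀ t : Nat, t ≤ N - K →
      RowShape N K ((List.range t).foldl (fun dp (k : Nat) => pvStepRow0 M W dp (1 + (k : Int))) dp1) ∧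
      ∀ j : Nat, j ≤ t →
        pvCell ((List.range t).foldl (fun dp (k : Nat) => pvStepRow0 M W dp (1 + (k : Int))) dp1) 0 j =
          gval M W 1 (j + 1) := by
  intro t
  induction t with
  | zero =>
    intro _
    refine ⟨hshape, fun j hj => ?_⟩
    interval_cases j
    exact hbase
  | succ t ih =>
    intro ht
    obtain ⟨ihs, ihc⟩ := ih (by omega)
    rw [List.range_succ, List.foldl_append, List.foldl_cons, List.foldl_nil]
    set dpt := (List.range t).foldl (fun dp (k : Nat) => pvStepRow0 M W dp (1 + (k : Int))) dp1 with hdpt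
    have hstep : pvStepRow0 M W dpt (1 + (t : Int)) =
        pvSetCell dpt 0 (t + 1) (min |M.getD (t + 1) 0 - W.getD 0 0| (pvCell dpt 0 t)) := by
      unfold pvStepRow0
      rw [pvGet_eq M _ (by omega), pvGet_eq W 0 (by omega),
          show ((1 : Int) + (t : Int)).toNat = t + 1 by omega,
          show ((1 : Int) + (t : Int) - 1).toNat = t by omega, Int.toNat_zero]
    rw [hstep]
    have hval : min |M.getD (t + 1) 0 - W.getD 0 0| (pvCell dpt 0 t) = gval M W 1 (t + 2) := by
      rw [ihc t le_rfl, gval_row0 M W (t + 1) (by omega)]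
    constructor
    · exact RowShape_set N K dpt 0 (t + 1) _ ihs
    · intro j hj
      rcases Nat.lt_or_ge j (t + 1) with hlt | hge
      · rw [pvCell_pvSetCell_ne_col dpt 0 (t + 1) _ j (by omega)]
        exact ihc j (by omega)
      · have hj1 : j = t + 1 := by omega
        subst hj1
        rw [pvCell_pvSetCell_self dpt 0 (t + 1) _ (by rw [ihs.1]; omega) ?_, hval]
        rw [ihs.2 0, if_pos (by omega : 0 < K)]
        omega


-- inner loop of A, row i (1 ≤ i ≤ K-1): processes j = i .. i+t-1
lemma innerA_fold (M W : List Int) (N K : Nat) (_hK : 1 ≤ K) (hKN : K ≤ N)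
    (_hM : N ≤ M.length) (_hW : K ≤ W.length) (i : Nat) (hi1 : 1 ≤ i) (hiK : i < K)
    (dp : List (List Int)) (hshape : RowShape N K dp)
    (hprev : ∀ j : Nat, i - 1 ≤ j → j ≤ N - K + (i - 1) → pvCell dp (i - 1) j = gval M W i (j + 1)) :
    ∀ t : Nat, t ≤ N - K + 1 →
      RowShape N K ((List.range t).foldl (fun d (k : Nat) => pvStepMain M W (i : Int) d ((i : Int) + (k : Int))) dp) ∧
      (∀ j : Nat, i - 1 ≤ j → j ≤ N - K + (i - 1) →
        pvCell ((List.range t).foldl (fun d (k : Nat) => pvStepMain M W (i : Int) d ((i : Int) + (k : Int))) dp) (i - 1) j = gval M W i (j + 1)) ∧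
      (∀ j : Nat, i ≤ j → j < i + t →
        pvCell ((List.range t).foldl (fun d (k : Nat) => pvStepMain M W (i : Int) d ((i : Int) + (k : Int))) dp) i j = gval M W (i + 1) (j + 1)) := by
  intro t
  induction t with
  | zero =>
    intro _
    exact ⟨hshape, fun j h1 h2 => hprev j h1 h2, fun j h1 h2 => absurd h2 (by omega)⟩
  | succ t ih =>
    intro ht
    obtain ⟨ihs, ihp, ihc⟩ := ih (by omega)
    rw [List.range_succ, List.foldl_append, List.foldl_cons, List.foldl_nil]
    set dpt := (List.range t).foldl (fun d (k : Nat) => pvStepMain M W (i : Int) d ((i : Int) + (k : Int))) dp with hdpt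
    have hiK' : i < dpt.length := by rw [ihs.1]; omega
    have hrowN : (dpt.getD i []).length = N := by rw [ihs.2 i, if_pos hiK]
    by_cases ht0 : t = 0
    · subst ht0
      have hstep : pvStepMain M W (i : Int) dpt ((i : Int) + ((0 : Nat) : Int)) =
          pvSetCell dpt i i (pvCell dpt (i - 1) (i - 1) + |M.getD i 0 - W.getD i 0|) := by
        unfold pvStepMain
        rw [if_pos (by omega : (i : Int) = (i : Int) + ((0 : Nat) : Int)),
            pvGet_eq M _ (by omega), pvGet_eq W _ (by omega),
            show ((i : Int) + ((0 : Nat) : Int)).toNat = i by omega,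
            show ((i : Int) - 1).toNat = i - 1 by omega,
            show ((i : Int) + ((0 : Nat) : Int) - 1).toNat = i - 1 by omega, Int.toNat_natCast]
      rw [hstep]
      have hval : pvCell dpt (i - 1) (i - 1) + |M.getD i 0 - W.getD i 0| = gval M W (i + 1) (i + 1) := by
        rw [ihp (i - 1) le_rfl (by omega), show i - 1 + 1 = i by omega]
        exact (gval_diag M W i).symm
      refine ⟨RowShape_set N K dpt i i _ ihs, fun j h1 h2 => ?_, fun j h1 h2 => ?_⟩
      · rw [pvCell_pvSetCell_ne_row dpt i i _ (i - 1) j (by omega)]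
        exact ihp j h1 h2
      · have hj : j = i := by omega
        rw [hj, pvCell_pvSetCell_self dpt i i _ hiK' (by omega), hval]
    · have hstep : pvStepMain M W (i : Int) dpt ((i : Int) + (t : Int)) =
          pvSetCell dpt i (i + t)
            (min (pvCell dpt i (i + t - 1))
                 (pvCell dpt (i - 1) (i + t - 1) + |M.getD (i + t) 0 - W.getD i 0|)) := by
        unfold pvStepMain
        rw [if_neg (by omega : ¬ ((i : Int) = (i : Int) + (t : Int))),
            pvGet_eq M _ (by omega), pvGet_eq W _ (by omega),
            show ((i : Int) + (t : Int)).toNat = i + t by omega,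
            show ((i : Int) - 1).toNat = i - 1 by omega,
            show ((i : Int) + (t : Int) - 1).toNat = i + t - 1 by omega, Int.toNat_natCast]
      rw [hstep]
      have hval : min (pvCell dpt i (i + t - 1))
          (pvCell dpt (i - 1) (i + t - 1) + |M.getD (i + t) 0 - W.getD i 0|) =
          gval M W (i + 1) (i + t + 1) := by
        rw [ihc (i + t - 1) (by omega) (by omega), ihp (i + t - 1) (by omega) (by omega),
            show i + t - 1 + 1 = i + t from by omega,
            gval_inner M W i (i + t) (by omega)]
      refine ⟨RowShape_set N K dpt i (i + t) _ ihs, fun j h1 h2 => ?_, fun j h1 h2 => ?_⟩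
      · rw [pvCell_pvSetCell_ne_row dpt i (i + t) _ (i - 1) j (by omega)]
        exact ihp j h1 h2
      · rcases Nat.lt_or_ge j (i + t) with hlt | hge
        · rw [pvCell_pvSetCell_ne_col dpt i (i + t) _ j (by omega)]
          exact ihc j h1 hlt
        · have hj : j = i + t := by omega
          subst hj
          rw [pvCell_pvSetCell_self dpt i (i + t) _ hiK' (by omega), hval]

-- A's outer loop: after rows 1 .. s, row s holds gval (s+1) (j+1) on its band
lemma outerA_fold (M W : List Int) (N K : Nat) (n m : Int) (hn : n = (N : Int)) (hm : m = (K : Int))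
    (hK : 1 ≤ K) (hKN : K ≤ N) (hM : N ≤ M.length) (hW : K ≤ W.length)
    (dp2 : List (List Int)) (hshape : RowShape N K dp2)
    (hrow0 : ∀ j : Nat, j ≤ N - K → pvCell dp2 0 j = gval M W 1 (j + 1)) :
    ∀ s : Nat, s ≤ K - 1 →
      RowShape N K ((List.range s).foldl (fun dp (q : Nat) => (PySem.List.pyRange (1 + (q : Int)) (n - m + (1 + (q : Int)) + 1)).foldl (pvStepMain M W (1 + (q : Int))) dp) dp2) ∧
      ∀ j : Nat, s ≤ j → j ≤ N - K + s →
        pvCell ((List.range s).foldl (fun dp (q : Nat) => (PySem.List.pyRange (1 + (q : Int)) (n - m + (1 + (q : Int)) + 1)).foldl (pvStepMain M W (1 + (q : Int))) dp) dp2) s j =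
          gval M W (s + 1) (j + 1) := by
  intro s
  induction s with
  | zero => intro _; exact ⟨hshape, fun j _ h2 => hrow0 j h2⟩
  | succ s ih =>
    intro hs
    obtain ⟨ihs, ihr⟩ := ih (by omega)
    rw [List.range_succ, List.foldl_append, List.foldl_cons, List.foldl_nil]
    set dps := (List.range s).foldl (fun dp (q : Nat) => (PySem.List.pyRange (1 + (q : Int)) (n - m + (1 + (q : Int)) + 1)).foldl (pvStepMain M W (1 + (q : Int))) dp) dp2 with hdps
    have hcast : (1 : Int) + (s : Int) = ((s + 1 : Nat) : Int) := by push_cast; ring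
    have hlen : (n - m + (1 + (s : Int)) + 1 - (1 + (s : Int))).toNat = N - K + 1 := by omega
    rw [PySem.List.pyRange_one, List.foldl_map, hlen]
    simp only [hcast]
    have hinner := innerA_fold M W N K hK hKN hM hW (s + 1) (by omega) (by omega) dps ihs
      (fun j hj1 hj2 => ihr j hj1 hj2) (N - K + 1) le_rfl
    refine ⟨hinner.1, fun j h1 h2 => hinner.2.2 j h1 (by omega)⟩

-- A's core computes gval m n
lemma coreA_eq (n m : Int) (men women : List Int)
    (h1 : 1 ≤ m) (h2 : m ≤ n) (h3 : n ≤ (men.length : Int)) (h4 : m ≤ (women.length : Int)) :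
    solutionCore n m men women =
      gval (PySem.List.sorted men (fun x => x)) (PySem.List.sorted women (fun x => x))
        m.toNat n.toNat := by
  unfold solutionCore
  dsimp only
  set M := PySem.List.sorted men (fun x => x) with hM'
  set W := PySem.List.sorted women (fun x => x) with hW'
  set K := m.toNat with hKdef
  set N := n.toNat with hNdef
  have hn : n = (N : Int) := by omega
  have hm : m = (K : Int) := by omega
  have hMlen : N ≤ M.length := by rw [hM', PySem.List.length_sorted]; omega
  have hWlen : K ≤ W.length := by rw [hW', PySem.List.length_sorted]; omega
  have hK : 1 ≤ K := by omega
  have hKN : K ≤ N := by omega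
  have hshape0 : RowShape N K (List.replicate K (List.replicate N (0 : Int))) := by
    refine ⟨by simp, fun r => ?_⟩
    by_cases hr : r < K <;>
      simp [List.getD_eq_getElem?_getD, hr]
  have hshape1 : RowShape N K (pvSetCell (List.replicate K (List.replicate N (0 : Int))) 0 0 |pvGet M 0 - pvGet W 0|) :=
    RowShape_set N K _ 0 0 _ hshape0
  have hbase : pvCell (pvSetCell (List.replicate K (List.replicate N (0 : Int))) 0 0 |pvGet M 0 - pvGet W 0|) 0 0 = gval M W 1 1 := by
    rw [pvCell_pvSetCell_self _ 0 0 _ (by simp; omega) ?_]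
    · rw [pvGet_eq M 0 le_rfl, pvGet_eq W 0 le_rfl, Int.toNat_zero, gval_one_one]
    · rw [hshape0.2 0, if_pos (by omega : 0 < K)]
      omega
  have hlen0 : (n - m + 1 - 1).toNat = N - K := by omega
  rw [PySem.List.pyRange_one 1 (n - m + 1), List.foldl_map, hlen0]
  have hrow := rowA_fold M W N K hK hKN hMlen hWlen _ hshape1 hbase (N - K) le_rfl
  have hlen1 : (m - 1).toNat = K - 1 := by omega
  rw [PySem.List.pyRange_one 1 m, List.foldl_map, hlen1]
  have hout := outerA_fold M W N K n m hn hm hK hKN hMlen hWlen _ hrow.1 hrow.2 (K - 1) le_rfl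
  have hfin := hout.2 (N - 1) (by omega) (by omega)
  rw [show (n - 1).toNat = N - 1 by omega, hfin,
      show K - 1 + 1 = K by omega, show N - 1 + 1 = N by omega]

-- ---- B-side ----

-- every value cached so far is the recurrence's value at its key
def MemoOK (M W : List Int) (memo : PySem.Dict (Nat × Nat) Int) : Prop :=
  ∀ i j v, PySem.Dict.get? memo (i, j) = some v → v = gval M W (i + 1) (j + 1)

lemma memoOK_empty (M W : List Int) : MemoOK M W PySem.Dict.empty := by
  intro i j v h
  rw [PySem.Dict.get?_empty] at h
  exact absurd h (by simp)

lemma memoOK_insert (M W : List Int) (memo : PySem.Dict (Nat × Nat) Int) (i j : Nat) (v : Int)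
    (hok : MemoOK M W memo) (hv : v = gval M W (i + 1) (j + 1)) :
    MemoOK M W (PySem.Dict.insert memo (i, j) v) := by
  intro i' j' v' h
  rw [PySem.Dict.get?_insert] at h
  by_cases he : (i', j') = (i, j)
  · rw [if_pos he] at h
    obtain ⟨rfl, rfl⟩ := Prod.mk.injEq .. ▸ he
    cases h
    exact hv
  · rw [if_neg he] at h
    exact hok i' j' v' h

-- rec(i, j) returns the recurrence's value and keeps the memo correct
lemma recB_spec (M W : List Int) :
    ∀ j i (memo : PySem.Dict (Nat × Nat) Int), i ≤ j → MemoOK M W memo →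
      (recB M W i j memo).1 = gval M W (i + 1) (j + 1) ∧ MemoOK M W (recB M W i j memo).2 := by
  intro j
  induction j using Nat.strong_induction_on with
  | _ j ih =>
    intro i memo hij hok
    cases hhit : PySem.Dict.get? memo (i, j) with
    | some v =>
      rw [recB.eq_def]
      simp only [hhit]
      exact ⟨hok i j v hhit, hok⟩
    | none =>
      cases i with
      | zero =>
        cases j with
        | zero =>
          rw [recB.eq_def]
          simp only [hhit]
          have hval : |pvGet M 0 - pvGet W 0| = gval M W (0 + 1) (0 + 1) := by
            rw [pvGet_eq M 0 le_rfl, pvGet_eq W 0 le_rfl, Int.toNat_zero]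
            exact (gval_one_one M W).symm
          exact ⟨hval, memoOK_insert M W memo 0 0 _ hok hval⟩
        | succ j' =>
          obtain ⟨hv, hm⟩ := ih j' (by omega) 0 memo (by omega) hok
          rw [recB.eq_def]
          simp only [hhit]
          have hval : min |pvGet M ((j' + 1 : Nat) : Int) - pvGet W 0| (recB M W 0 j' memo).1
              = gval M W (0 + 1) (j' + 1 + 1) := by
            rw [hv, pvGet_eq M _ (by positivity), pvGet_eq W 0 le_rfl]
            rw [show (((j' + 1 : Nat) : Int)).toNat = j' + 1 by omega, Int.toNat_zero]
            exact (gval_row0 M W (j' + 1) (by omega)).symm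
          exact ⟨hval, memoOK_insert M W _ 0 (j' + 1) _ hm hval⟩
      | succ i' =>
        cases j with
        | zero => omega
        | succ j' =>
          by_cases heq : j' + 1 = i' + 1
          · have hii : i' = j' := by omega
            subst hii
            obtain ⟨hv, hm⟩ := ih i' (by omega) i' memo le_rfl hok
            rw [recB.eq_def]
            simp only [hhit]
            have hval : (recB M W i' i' memo).1 +
                |pvGet M ((i' + 1 : Nat) : Int) - pvGet W ((i' + 1 : Nat) : Int)| =
                gval M W (i' + 1 + 1) (i' + 1 + 1) := by
              rw [hv, pvGet_eq M _ (by positivity), pvGet_eq W _ (by positivity)]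
              rw [show (((i' + 1 : Nat) : Int)).toNat = i' + 1 by omega]
              exact (gval_diag M W (i' + 1)).symm
            exact ⟨hval, memoOK_insert M W _ (i' + 1) (i' + 1) _ hm hval⟩
          · have hlt : i' + 1 ≤ j' := by omega
            obtain ⟨hv1, hm1⟩ := ih j' (by omega) (i' + 1) memo hlt hok
            obtain ⟨hv2, hm2⟩ := ih j' (by omega) i' (recB M W (i' + 1) j' memo).2 (by omega) hm1
            rw [recB.eq_def]
            simp only [hhit, if_neg heq]
            have hval : min (recB M W (i' + 1) j' memo).1
                ((recB M W i' j' (recB M W (i' + 1) j' memo).2).1 +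
                  |pvGet M ((j' + 1 : Nat) : Int) - pvGet W ((i' + 1 : Nat) : Int)|) =
                gval M W (i' + 1 + 1) (j' + 1 + 1) := by
              rw [hv1, hv2, pvGet_eq M _ (by positivity), pvGet_eq W _ (by positivity)]
              rw [show (((j' + 1 : Nat) : Int)).toNat = j' + 1 by omega,
                  show (((i' + 1 : Nat) : Int)).toNat = i' + 1 by omega]
              exact (gval_inner M W (i' + 1) (j' + 1) (by omega)).symm
            exact ⟨hval, memoOK_insert M W _ (i' + 1) (j' + 1) _ hm2 hval⟩

-- B's core computes gval m n
lemma coreB_eq (n m : Int) (men women : List Int)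
    (h1 : 1 ≤ m) (h2 : m ≤ n) (_h3 : n ≤ (men.length : Int)) (_h4 : m ≤ (women.length : Int)) :
    solutionAltCore n m men women =
      gval (PySem.List.sorted men (fun x => x)) (PySem.List.sorted women (fun x => x))
        m.toNat n.toNat := by
  unfold solutionAltCore
  dsimp only
  set M := PySem.List.sorted men (fun x => x) with hM'
  set W := PySem.List.sorted women (fun x => x) with hW'
  have h := (recB_spec M W (n - 1).toNat (m - 1).toNat PySem.Dict.empty (by omega)
    (memoOK_empty M W)).1
  rw [h, show (m - 1).toNat + 1 = m.toNat by omega, show (n - 1).toNat + 1 = n.toNat by omega]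

-- ===== VERDICT (by name: the statement is the Claim_ definition above) =====
theorem solution_spec : Claim_equal_solution := by
  intro n m men women _hdom hpre
  obtain ⟨h1, h2, h3, h4⟩ := hpre
  unfold Spec_solution solution solution_alt
  by_cases h : n < m
  · simp only [if_pos h]
    rw [coreA_eq m n women men h1 (le_of_lt h) h4 h3,
        coreB_eq m n women men h1 (le_of_lt h) h4 h3]
  · simp only [if_neg h]
    rw [coreA_eq n m men women h2 (le_of_not_gt h) h3 h4,
        coreB_eq n m men women h2 (le_of_not_gt h) h3 h4]
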